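-- pv_equiv track=rewrite | github.com/MagicGirl93/python_exercises | dict_biggest_value.py | f
-- ===== SOURCE A (Python) =====
-- def f(x):
--     """Return the first ascending KEY ordering of a dictionary
--     based on the second biggest value that is given in a dictionary
--     biggest value that is given in a dictionary"""
--
--     list_val = list(x.values())
--     list_values1 = set(list_val)
--     try:
--         list_values1.remove(None)
--     except:
--         pass
--
--     list_values2 = list(list_values1)
--     list_values2.sort(reverse=True)
--     if len(list_values2) <= 1:
--         return None
--     else:
--         v = list_values2[1]
--
--     l2 = []
--     for k in x.keys():
--         if x.get(k) == v:
--             l2.append(k)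
--
--     l2.sort()
--
--     return l2[0]
-- ===== SOURCE B (Python) =====
-- def f(x):
--     """Smallest key among those mapping to the second-largest distinct non-None
--     value; None if fewer than two distinct non-None values exist.
--     One grouping pass instead of A's sort-all-values + rescan-all-keys."""
--     groups = {}
--     for k, v in x.items():
--         if v is None:
--             continue
--         groups.setdefault(v, []).append(k)
--     if len(groups) <= 1:
--         return None
--     m1 = max(groups)
--     m2 = max(v for v in groups if v != m1)
--     return min(groups[m2])
-- ===== Notes on version B (the rewrite author's own statement) =====
-- stated objective: alternative
-- what changed: B builds a value->keys grouping dict in one pass and picks the second-largest value by two linear max scans, replacing A's build-set/sort-all-values-descending phase followed by a full rescan of every key against the chosen value.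
import Mathlib
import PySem

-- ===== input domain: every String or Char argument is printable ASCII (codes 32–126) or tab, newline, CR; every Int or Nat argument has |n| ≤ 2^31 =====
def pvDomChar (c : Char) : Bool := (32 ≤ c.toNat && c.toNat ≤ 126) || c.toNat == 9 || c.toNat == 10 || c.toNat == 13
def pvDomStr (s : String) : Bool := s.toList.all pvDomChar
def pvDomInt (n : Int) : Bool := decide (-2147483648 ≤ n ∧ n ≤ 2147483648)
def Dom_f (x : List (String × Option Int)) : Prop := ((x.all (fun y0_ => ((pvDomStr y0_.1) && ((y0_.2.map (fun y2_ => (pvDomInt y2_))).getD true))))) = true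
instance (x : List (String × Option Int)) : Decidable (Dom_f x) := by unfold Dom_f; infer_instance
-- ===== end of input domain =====

-- B replaces A's sort-all-distinct-values + rescan-of-every-key with one grouping
-- pass (value -> keys) and two linear max scans (objective: alternative algorithm).

-- ===== PORT A =====
def f (x : List (String × Option Int)) : Option String :=
  let d := PySem.Dict.mk x
  let list_val : List (Option Int) := d.values
  let set1 : PySem.Set (Option Int) := PySem.Set.ofList list_val
  -- try: list_values1.remove(None) except: pass
  let list_values1 : PySem.Set (Option Int) := (PySem.Set.remove? set1 none).getD set1
  -- list(list_values1); after the remove every element is 'some n', so unwrapping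
  -- with filterMap id is exact and the ints sort below exactly as in Python
  let list_values2 : List Int := PySem.List.sorted (list_values1.filterMap id) (fun v => v) true
  if list_values2.length ≤ 1 then none
  else
    match PySem.List.pyGet? list_values2 1 with   -- v = list_values2[1]
    | none => none                                 -- unreachable: length ≥ 2 here
    | some v =>
      let l2 := d.keys.foldl
        (fun l2 k => if d.get? k == some (some v) then l2 ++ [k] else l2) []
      -- l2.sort(); return l2[0]  (l2 ≠ [] whenever v is one of the values)
      (PySem.List.sorted l2 (fun k => k) false).head?

-- ===== PORT B =====
def f_alt (x : List (String × Option Int)) : Option String :=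
  let groups : PySem.Dict Int (List String) :=
    x.foldl (fun d kv =>
      match kv.2 with
      | none => d                                       -- if v is None: continue
      | some v => d.modify v [] (fun l => l ++ [kv.1])) -- groups.setdefault(v, []).append(k)
      PySem.Dict.empty
  if groups.size ≤ 1 then none
  else
    match PySem.List.max? groups.keys (fun v => v) with          -- m1 = max(groups)
    | none => none                                               -- unreachable: size ≥ 2
    | some m1 =>
      match PySem.List.max? (groups.keys.filter (fun v => !(v == m1))) (fun v => v) with
      | none => none                                             -- unreachable: size ≥ 2
      | some m2 => PySem.List.min? (groups.getD m2 []) (fun k => k)  -- min(groups[m2])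

-- ===== PRECONDITION & SPEC =====
-- Pre_ excludes association lists with duplicate keys: a Python dict cannot contain
-- them, so such lists do not encode any dict input of A.
def Pre_f (x : List (String × Option Int)) : Prop := (x.map Prod.fst).Nodup
instance (x : List (String × Option Int)) : Decidable (Pre_f x) := by unfold Pre_f; infer_instance
def pvWitness_f : (List (String × Option Int)) := [("a", some 1), ("b", some 2), ("c", none)]
def Spec_f (x : List (String × Option Int)) (out : Option String) : Prop := out = f_alt x
instance (x : List (String × Option Int)) (out : Option String) : Decidable (Spec_f x out) := by unfold Spec_f; infer_instance

-- ===== CLAIM (what is proved, stated in full; the proofs are below) =====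
def Claim_equal_f : Prop := ∀ (x : List (String × Option Int)), Dom_f x → Pre_f x → Spec_f x (f x)

-- ===== LEMMAS AND PROOFS =====

-- the keys of x carrying value v, in order
def pvKeysWith (x : List (String × Option Int)) (v : Int) : List String :=
  (x.filter (fun kv => kv.2 == some v)).map (fun kv => kv.1)

-- B's loop, rewritten over the (value, key) pairs of the non-None entries
def pvPairs (x : List (String × Option Int)) : List (Int × String) :=
  x.filterMap (fun kv => kv.2.map (fun v => (v, kv.1)))

lemma pvFold_eq (x : List (String × Option Int)) (d : PySem.Dict Int (List String)) :
    x.foldl (fun d kv =>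
      match kv.2 with
      | none => d
      | some v => d.modify v [] (fun l => l ++ [kv.1])) d
    = (pvPairs x).foldl (fun d p => d.modify p.1 [] (fun l => l ++ [p.2])) d := by
  induction x generalizing d with
  | nil => rfl
  | cons kv t ih =>
    obtain ⟨k, w⟩ := kv
    cases w <;> simp [pvPairs] <;> exact ih _

lemma pvPairs_fst (x : List (String × Option Int)) :
    (pvPairs x).map Prod.fst = x.filterMap (fun kv => kv.2) := by
  induction x with
  | nil => rfl
  | cons kv t ih =>
    obtain ⟨k, w⟩ := kv
    cases w <;> simp [pvPairs] at * <;> exact ih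

lemma pvPairs_group (x : List (String × Option Int)) (v : Int) :
    ((pvPairs x).filter (fun p => p.1 == v)).map (fun p => p.2) = pvKeysWith x v := by
  induction x with
  | nil => rfl
  | cons kv t ih =>
    obtain ⟨k, w⟩ := kv
    cases w with
    | none => simpa [pvPairs, pvKeysWith] using ih
    | some u =>
      by_cases hu : u = v <;>
        simp [pvPairs, pvKeysWith, hu] at * <;>
        simpa [pvKeysWith] using ih

-- head of an ascending sort is min (Python's l.sort(); l[0]  vs  min(l))
lemma pvHead_sorted_eq_min (L : List String) :
    (PySem.List.sorted L (fun k => k) false).head? = PySem.List.min? L (fun k => k) := by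
  cases hL : PySem.List.sorted L (fun k => k) false with
  | nil =>
    have : L = [] := (PySem.List.sorted_eq_nil_iff L _ false).mp hL
    subst this
    rfl
  | cons m t =>
    have hmem : m ∈ L := (PySem.List.sorted_perm L (fun k => k) false).mem_iff.mp (by simp [hL])
    have hne : L ≠ [] := by rintro rfl; simp at hmem
    obtain ⟨m', hm'⟩ := Option.ne_none_iff_exists'.mp
      (fun h => hne ((PySem.List.min?_eq_none_iff L (fun k => k)).mp h))
    have h1 : m ≤ m' := by
      have := PySem.List.key_head_sorted_le L (fun k => k) hL m' (PySem.List.min?_mem hm')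
      simpa using this
    have h2 : m' ≤ m := by simpa using PySem.List.min?_isMin hm' m hmem
    simp [hm', le_antisymm h1 h2]

-- A's filtered key list equals pvKeysWith, for nodup keys
lemma pvL2_eq (x : List (String × Option Int)) (h : (x.map Prod.fst).Nodup) (v : Int) :
    ((PySem.Dict.mk x).keys).filter (fun k => (PySem.Dict.mk x).get? k == some (some v))
      = pvKeysWith x v := by
  have hk : (PySem.Dict.mk x).keys = x.map Prod.fst := rfl
  rw [hk, List.filter_map]
  unfold pvKeysWith
  congr 1
  apply List.filter_congr
  intro kv hkv
  have : (PySem.Dict.mk x).get? kv.1 = some kv.2 :=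
    PySem.Dict.get?_of_mem_items (PySem.Dict.mk x) (by exact hkv) h
  simp [Function.comp, this]

-- A's deduplicated non-None value list
def pvW (x : List (String × Option Int)) : List Int :=
  (PySem.Set.ofList ((PySem.Dict.mk x).values)).filterMap id

lemma pvRemove_eq (x : List (String × Option Int)) :
    (((PySem.Set.remove? (PySem.Set.ofList ((PySem.Dict.mk x).values)) none).getD
        (PySem.Set.ofList ((PySem.Dict.mk x).values))).filterMap id) = pvW x := by
  unfold pvW
  set S := PySem.Set.ofList ((PySem.Dict.mk x).values)
  unfold PySem.Set.remove?
  split_ifs with h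
  · simp only [Option.getD_some]
    unfold PySem.Set.discard
    clear h
    induction S with
    | nil => rfl
    | cons a t ih =>
      cases a with
      | none => simpa only [List.filter_cons, List.filterMap_cons] using ih
      | some w =>
        simp only [List.filter_cons, List.filterMap_cons,
          show (!(some w : Option Int) == none) = true from rfl, id]
        exact congrArg _ ih
  · rfl

lemma pvW_nodup (x : List (String × Option Int)) : (pvW x).Nodup := by
  apply List.Nodup.filterMap
  · intro a a' b hb hb'
    simp only [id] at hb hb'
    cases a <;> cases a' <;> simp_all
  · exact PySem.Set.nodup_ofList _

lemma pvW_mem (x : List (String × Option Int)) (u : Int) :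
    u ∈ pvW x ↔ some u ∈ x.map (fun kv => kv.2) := by
  unfold pvW
  rw [List.mem_filterMap]
  constructor
  · rintro ⟨a, ha, hab⟩
    cases a with
    | none => simp at hab
    | some w =>
      simp only [id, Option.some.injEq] at hab
      subst hab
      have := (PySem.Set.mem_ofList _ _).mp ha
      simpa [PySem.Dict.values] using this
  · intro hu
    refine ⟨some u, (PySem.Set.mem_ofList _ _).mpr ?_, rfl⟩
    simpa [PySem.Dict.values] using hu

lemma pvKeys_mem (x : List (String × Option Int)) (u : Int) :
    u ∈ PySem.Set.ofList (x.filterMap (fun kv => kv.2)) ↔ some u ∈ x.map (fun kv => kv.2) := by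
  rw [PySem.Set.mem_ofList, List.mem_filterMap]
  constructor
  · rintro ⟨kv, hkv, h2⟩
    exact List.mem_map.mpr ⟨kv, hkv, h2⟩
  · intro h
    obtain ⟨kv, hkv, h2⟩ := List.mem_map.mp h
    exact ⟨kv, hkv, h2⟩

lemma pvMain (x : List (String × Option Int)) (hpre : (x.map Prod.fst).Nodup) :
    f x = f_alt x := by
  unfold f f_alt
  simp only [pvFold_eq, pvRemove_eq]
  set KS : List Int := PySem.Set.ofList (x.filterMap (fun kv => kv.2)) with hKS
  set P : List (Int × String) := pvPairs x with hP
  set G : PySem.Dict Int (List String) :=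
    P.foldl (fun d p => d.modify p.1 [] (fun l => l ++ [p.2])) PySem.Dict.empty with hG
  have hkeys : G.keys = KS := by
    rw [hG, PySem.Dict.keys_foldl_modify_key P Prod.fst [] (fun _ p l => l ++ [p.2])]
    show PySem.Set.update PySem.Dict.empty.keys (P.map Prod.fst) = KS
    rw [show PySem.Dict.empty.keys = ([] : List Int) from rfl, PySem.Set.update_nil_left,
      hP, pvPairs_fst]
  have hsize : G.size = KS.length := by
    rw [← hkeys]; simp [PySem.Dict.size, PySem.Dict.keys]
  have hmemW : ∀ u : Int, u ∈ pvW x ↔ u ∈ KS := by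
    intro u; rw [pvW_mem, hKS, pvKeys_mem]
  have hlen : (pvW x).length = KS.length :=
    (((List.perm_ext_iff_of_nodup (pvW_nodup x) (PySem.Set.nodup_ofList _)).mpr hmemW)).length_eq
  set S2 : List Int := PySem.List.sorted (pvW x) (fun v => v) true with hS2
  have hlenS2 : S2.length = (pvW x).length := (PySem.List.sorted_perm _ _ _).length_eq
  by_cases hle : S2.length ≤ 1
  · rw [if_pos hle, if_pos (by omega)]
  · rw [if_neg hle, if_neg (by omega)]
    obtain ⟨a, t1, ht1⟩ := List.exists_cons_of_ne_nil
      (show S2 ≠ [] by intro h; rw [h] at hle; simp at hle)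
    obtain ⟨b, t, ht⟩ := List.exists_cons_of_ne_nil
      (show t1 ≠ [] by intro h; rw [h] at ht1; rw [ht1] at hle; simp at hle)
    have hS2e : S2 = a :: b :: t := by rw [ht1, ht]
    rw [hS2e]
    have hget : PySem.List.pyGet? (a :: b :: t) 1 = some b := by
      simp [PySem.List.pyGet?, PySem.List.pyIdx?]
    rw [hget]
    -- facts about a (the largest distinct value) and b (the second largest)
    have hperm : S2.Perm (pvW x) := PySem.List.sorted_perm _ _ _
    have hnodupS2 : S2.Nodup := (hperm.nodup_iff).mpr (pvW_nodup x)
    have hab : a ≠ b := by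
      rw [hS2e] at hnodupS2
      exact fun h => (List.nodup_cons.mp hnodupS2).1 (h ▸ List.mem_cons_self)
    have hamem : a ∈ pvW x := hperm.subset (by rw [hS2e]; exact List.mem_cons_self)
    have hbmem : b ∈ pvW x := hperm.subset (by rw [hS2e]; simp)
    have hmaxa : ∀ y ∈ pvW x, y ≤ a := by
      intro y hy
      simpa using PySem.List.key_head_sorted_rev_ge (pvW x) (fun v => v) (hS2 ▸ hS2e) y hy
    have hmaxb : ∀ y ∈ pvW x, y ≠ a → y ≤ b := by
      intro y hy hya
      have hyS2 : y ∈ S2 := hperm.mem_iff.mpr hy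
      rw [hS2e] at hyS2
      rcases List.mem_cons.mp hyS2 with h | h
      · exact absurd h hya
      rcases List.mem_cons.mp h with h | h
      · exact le_of_eq h
      · have hpw := PySem.List.sorted_pairwise_rev (pvW x) (fun v => v)
        rw [← hS2, hS2e] at hpw
        exact (List.pairwise_cons.mp (List.pairwise_cons.mp hpw).2).1 y h
    -- m1 = max(groups) is a
    rw [hkeys]
    cases hm1 : PySem.List.max? KS (fun v => v) with
    | none =>
      exfalso
      have : KS = [] := (PySem.List.max?_eq_none_iff KS _).mp hm1
      rw [this] at hlen; simp at hlen
      rw [hlen] at hlenS2; rw [hS2e] at hlenS2; simp at hlenS2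
    | some m1 =>
      have hm1a : m1 = a := by
        have h1 : m1 ≤ a := hmaxa m1 ((hmemW m1).mpr (PySem.List.max?_mem hm1))
        have h2 : a ≤ m1 := by
          simpa using PySem.List.max?_isMax hm1 a ((hmemW a).mp hamem)
        exact le_antisymm h1 h2
      simp only []
      -- m2 = max of the remaining values is b
      have hbf : b ∈ KS.filter (fun v => !(v == m1)) := by
        rw [List.mem_filter]
        exact ⟨(hmemW b).mp hbmem, by simp [hm1a]; exact (Ne.symm hab)⟩
      cases hm2 : PySem.List.max? (KS.filter (fun v => !(v == m1))) (fun v => v) with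
      | none =>
        exfalso
        have : KS.filter (fun v => !(v == m1)) = [] := (PySem.List.max?_eq_none_iff _ _).mp hm2
        rw [this] at hbf; simp at hbf
      | some m2 =>
        simp only []
        have hm2b : m2 = b := by
          have hm2f := PySem.List.max?_mem hm2
          rw [List.mem_filter] at hm2f
          have hm2W : m2 ∈ pvW x := (hmemW m2).mpr hm2f.1
          have hm2a : m2 ≠ a := by have := hm2f.2; simp [hm1a] at this; exact this
          have h1 : m2 ≤ b := hmaxb m2 hm2W hm2a
          have h2 : b ≤ m2 := by simpa using PySem.List.max?_isMax hm2 b hbf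
          exact le_antisymm h1 h2
        rw [hm2b]
        -- both sides are the minimum of the keys carrying value b
        rw [PySem.List.foldl_append_if_eq_filter
          (fun k => (PySem.Dict.mk x).get? k == some (some b)) ((PySem.Dict.mk x).keys) []]
        simp only [List.nil_append]
        rw [pvL2_eq x hpre b, pvHead_sorted_eq_min]
        rw [hG, PySem.Dict.getD_foldl_modify_append P PySem.Dict.empty b]
        rw [show (PySem.Dict.empty : PySem.Dict Int (List String)).getD b [] = [] from rfl]
        rw [hP, pvPairs_group x b, List.nil_append]

-- ===== VERDICT (by name: the statement is the Claim_ definition above) =====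
theorem f_spec : Claim_equal_f := by
  intro x _ hpre
  unfold Spec_f
  exact pvMain x hpre
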